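-- pv_equiv track=rewrite | github.com/VastEpiphany/Leetcode_HAHAHA | Binary Algorithms/Binary Ans-Calculate Max/2982.py | check
-- ===== SOURCE A (Python) =====
-- from collections import defaultdict
--
-- def check(s: str,m: int) -> int:
--     dict_cnt = defaultdict(int)
--
--     for i in range(0,len(s)- m + 1):
--         dict_cnt[s[i:i+m]] = dict_cnt.get(s[i:i+m],0) + 1
--
--     for k in dict_cnt.keys():
--         if dict_cnt[k] >= 3 and len(set(k)) == 1:
--             return True
--     return False
-- ===== SOURCE B (Python) =====
-- def check(s: str, m: int) -> int:
--     # One pass: track the length of the current equal-char run; every position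
--     # ending a run of length >= m starts... er, ends one single-char window of
--     # length m; count such windows per character and succeed at the third one.
--     counts = {}
--     run = 0
--     prev = None
--     for ch in s:
--         run = run + 1 if ch == prev else 1
--         prev = ch
--         if run >= m:
--             c = counts.get(ch, 0) + 1
--             if c >= 3:
--                 return True
--             counts[ch] = c
--     return False
-- ===== Notes on version B (the rewrite author's own statement) =====
-- stated objective: faster
-- what changed: Instead of hashing every length-m substring into a dict and then scanning the keys, B makes a single pass that tracks the length of the current equal-character run and counts, per character, the windows that end at each position, returning True at the third one.
-- outside the precondition, e.g. on check('aaa', -4): A returns False, B returns True; on check('aaaa', -3): A returns True, B returns True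
import Mathlib
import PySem

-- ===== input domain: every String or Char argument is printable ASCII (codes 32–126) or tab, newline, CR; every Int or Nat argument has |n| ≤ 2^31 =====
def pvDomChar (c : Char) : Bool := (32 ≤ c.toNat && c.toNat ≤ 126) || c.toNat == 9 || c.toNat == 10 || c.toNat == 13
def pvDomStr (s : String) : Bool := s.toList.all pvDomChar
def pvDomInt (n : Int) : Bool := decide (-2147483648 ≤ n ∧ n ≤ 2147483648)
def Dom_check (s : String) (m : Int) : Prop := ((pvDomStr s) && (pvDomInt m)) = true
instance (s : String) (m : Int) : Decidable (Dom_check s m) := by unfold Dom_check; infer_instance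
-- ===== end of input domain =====

-- B replaces A's dict of all length-m substrings by a single pass over equal-char runs
-- with a per-character window counter (objective: faster).


-- ===== PORT A =====
def check (s : String) (m : Int) : Bool :=
  let l := s.toList
  let d := (PySem.List.pyRange 0 ((l.length : Int) - m + 1)).foldl
      (fun d i => d.insert (PySem.List.slice l (some i) (some (i + m)))
                           (d.getD (PySem.List.slice l (some i) (some (i + m))) 0 + 1))
      (PySem.Dict.empty : PySem.Dict (List Char) Int)
  d.keys.any (fun k => decide (3 ≤ d.getD k 0) && ((PySem.Set.ofList k : List Char).length == 1))

-- ===== PORT B =====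
def checkAltGo (m : Int) (counts : PySem.Dict Char Int) (run : Int) (prev : Option Char) :
    List Char → Bool
  | [] => false
  | ch :: rest =>
    let run' := if some ch == prev then run + 1 else 1
    if m ≤ run' then
      let c := counts.getD ch 0 + 1
      if 3 ≤ c then true
      else checkAltGo m (counts.insert ch c) run' (some ch) rest
    else checkAltGo m counts run' (some ch) rest

def check_alt (s : String) (m : Int) : Bool :=
  checkAltGo m PySem.Dict.empty 0 none s.toList

-- ===== PRECONDITION & SPEC =====
-- Pre_ excludes m ≤ 0, outside the problem's stated domain (1 ≤ m): there A's value comes from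
-- Python's negative-slice wraparound (it counts substrings of length len(s)+m) and B's from a
-- trivially met run threshold — both accidental, neither specified.
def Pre_check (s : String) (m : Int) : Prop := 1 ≤ m
instance (s : String) (m : Int) : Decidable (Pre_check s m) := by unfold Pre_check; infer_instance
def pvWitness_check : String × Int := ("aabbb", 2)

def Spec_check (s : String) (m : Int) (out : Bool) : Prop := out = check_alt s m
instance (s : String) (m : Int) (out : Bool) : Decidable (Spec_check s m out) := by
  unfold Spec_check; infer_instance

-- ===== CLAIM (what is proved, stated in full; the proofs are below) =====
def Claim_equal_check : Prop := ∀ (s : String) (m : Int), Dom_check s m → Pre_check s m →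
  Spec_check s m (check s m)

-- ===== LEMMAS AND PROOFS =====

-- the list of window start positions counted by both programs, in start form
def pvSlices (l : List Char) (mN K : Nat) : List (List Char) :=
  (List.range K).map (fun k => (l.drop k).take mN)

-- the per-step model of B's scan: the character at every position where a window ends
def pvEnds (m : Int) (prev : Option Char) (run : Int) : List Char → List Char
  | [] => []
  | ch :: rest =>
    let run' := if some ch == prev then run + 1 else 1
    (if m ≤ run' then [ch] else []) ++ pvEnds m (some ch) run' rest

-- length of the maximal constant suffix
def pvConstRun (u : List Char) : Nat :=
  match u.reverse with
  | [] => 0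
  | a :: t => (t.takeWhile (fun x => x == a)).length + 1

theorem pv_take_replicate_iff (r : List Char) (k : Nat) (c : Char) :
    r.take k = List.replicate k c ↔ k ≤ (r.takeWhile (fun x => x == c)).length := by
  induction r generalizing k with
  | nil =>
    simp only [List.take_nil, List.takeWhile_nil, List.length_nil, Nat.le_zero]
    constructor
    · intro h; by_contra hk
      have := congrArg List.length h; simp at this; omega
    · rintro rfl; simp
  | cons a t ih =>
    cases k with
    | zero => simp
    | succ k =>
      simp only [List.take_succ_cons, List.takeWhile_cons]
      by_cases hac : a = c
      · subst hac
        simp only [beq_self_eq_true, if_true, List.length_cons, List.replicate_succ,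
          List.cons.injEq, true_and, Nat.add_le_add_iff_right, ih]
      · have : (a == c) = false := by simp [hac]
        simp [this, hac, List.replicate_succ]

theorem pv_constRun_le (u : List Char) : pvConstRun u ≤ u.length := by
  rcases h : u.reverse with _ | ⟨a, t⟩
  · have : u = [] := by simpa using congrArg List.reverse h
    simp [this, pvConstRun]
  · have hcr : pvConstRun u = (t.takeWhile (fun x => x == a)).length + 1 := by
      unfold pvConstRun; rw [h]
    have h1 : (t.takeWhile (fun x => x == a)).length ≤ t.length :=
      (List.takeWhile_sublist _).length_le
    have h2 : u.length = t.length + 1 := by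
      have := congrArg List.length h; simpa using this
    omega

theorem pv_suffix_iff (v : List Char) (hv : v ≠ []) (c : Char) (mN : Nat) (h1 : 1 ≤ mN) :
    v.drop (v.length - mN) = List.replicate mN c ↔
    mN ≤ pvConstRun v ∧ v.getLast? = some c := by
  have hrev : v.drop (v.length - mN) = (v.reverse.take mN).reverse := by
    have := List.reverse_take (l := v.reverse) (i := mN)
    simpa using this.symm
  rw [hrev]
  have : (v.reverse.take mN).reverse = List.replicate mN c ↔
      v.reverse.take mN = List.replicate mN c := by
    constructor
    · intro h
      have := congrArg List.reverse h
      simpa using this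
    · intro h; rw [h]; simp [List.reverse_replicate]
  rw [this, pv_take_replicate_iff]
  rcases h : v.reverse with _ | ⟨a, t⟩
  · exfalso; apply hv; simpa using congrArg List.reverse h
  · have hlast : v.getLast? = some a := by
      rw [List.getLast?_eq_head?_reverse, h]; rfl
    have hcr : pvConstRun v = (t.takeWhile (fun x => x == a)).length + 1 := by
      unfold pvConstRun; rw [h]
    rw [hlast, hcr]
    by_cases hac : a = c
    · subst hac
      simp only [List.takeWhile_cons, beq_self_eq_true, if_true, List.length_cons]
      constructor
      · intro hk; exact ⟨hk, trivial⟩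
      · rintro ⟨hk, -⟩; exact hk
    · have hb : (a == c) = false := by simp [hac]
      simp only [List.takeWhile_cons, hb, Bool.false_eq_true, if_false, List.length_nil,
        Option.some.injEq]
      constructor
      · intro hk; omega
      · rintro ⟨-, hk⟩; exact absurd hk hac

theorem pv_constRun_snoc (u : List Char) (ch : Char) :
    pvConstRun (u ++ [ch]) = if some ch == u.getLast? then pvConstRun u + 1 else 1 := by
  unfold pvConstRun
  rw [List.reverse_append]
  simp only [List.reverse_singleton, List.singleton_append]
  rcases h : u.reverse with _ | ⟨a, t⟩
  · have hu : u = [] := by simpa using congrArg List.reverse h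
    subst hu; simp
  · have hlast : u.getLast? = some a := by
      rw [List.getLast?_eq_head?_reverse, h]; rfl
    rw [hlast]
    by_cases hac : a = ch
    · subst hac
      simp
    · have h1 : (some a == some ch) = false := by simp [hac]
      have h2 : (some ch == some a) = false := by simp [Ne.symm hac]
      simp [h2, hac]

theorem pv_head_window_iff (u : List Char) (ch c : Char) (rest : List Char) (mN : Nat)
    (h1 : 1 ≤ mN) :
    (mN ≤ pvConstRun (u ++ [ch]) ∧ ch = c) ↔
    (mN ≤ u.length + 1 ∧
      ((u ++ ch :: rest).drop (u.length + 1 - mN)).take mN = List.replicate mN c) := by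
  have hvlen : (u ++ [ch]).length = u.length + 1 := by simp
  have hconc : u ++ ch :: rest = (u ++ [ch]) ++ rest := by simp
  by_cases hle : mN ≤ u.length + 1
  · have hk : u.length + 1 - mN ≤ (u ++ [ch]).length := by omega
    have hdrop : (u ++ ch :: rest).drop (u.length + 1 - mN)
        = (u ++ [ch]).drop (u.length + 1 - mN) ++ rest := by
      rw [hconc, List.drop_append_of_le_length hk]
    have hlen2 : ((u ++ [ch]).drop (u.length + 1 - mN)).length = mN := by
      rw [List.length_drop, hvlen]; omega
    have htake : ((u ++ ch :: rest).drop (u.length + 1 - mN)).take mN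
        = (u ++ [ch]).drop (u.length + 1 - mN) := by
      rw [hdrop, List.take_left' hlen2]
    rw [htake]
    have hidx : u.length + 1 - mN = (u ++ [ch]).length - mN := by rw [hvlen]
    rw [hidx, pv_suffix_iff (u ++ [ch]) (by simp) c mN h1, List.getLast?_concat]
    constructor
    · rintro ⟨hcr, rfl⟩; exact ⟨hle, hcr, rfl⟩
    · rintro ⟨-, hcr, hc⟩; exact ⟨hcr, by simpa using hc⟩
  · constructor
    · rintro ⟨hcr, -⟩
      have hb := pv_constRun_le (u ++ [ch])
      rw [hvlen] at hb; omega
    · rintro ⟨h, -⟩; omega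

theorem pv_ends_count (mN : Nat) (h1 : 1 ≤ mN) (c : Char) :
    ∀ (l u : List Char),
    (pvEnds (mN : Int) u.getLast? (pvConstRun u : Int) l).count c =
    (List.range l.length).countP (fun j =>
      decide (mN ≤ u.length + j + 1 ∧
        ((u ++ l).drop (u.length + j + 1 - mN)).take mN = List.replicate mN c)) := by
  intro l
  induction l with
  | nil => intro u; simp [pvEnds]
  | cons ch rest ih =>
    intro u
    have hrun : (if some ch == u.getLast? then (pvConstRun u : Int) + 1 else 1)
        = (pvConstRun (u ++ [ch]) : Int) := by
      cases hb : (some ch == u.getLast?) <;> simp [pv_constRun_snoc, hb]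
    have hcondIff : ((mN : Int) ≤ (pvConstRun (u ++ [ch]) : Int)) ↔
        mN ≤ pvConstRun (u ++ [ch]) := by exact_mod_cast Iff.rfl
    have hstep : pvEnds (mN : Int) u.getLast? (pvConstRun u : Int) (ch :: rest)
        = (if mN ≤ pvConstRun (u ++ [ch]) then [ch] else [])
          ++ pvEnds (mN : Int) (some ch) (pvConstRun (u ++ [ch]) : Int) rest := by
      show (if (mN : Int) ≤ (if some ch == u.getLast? then (pvConstRun u : Int) + 1 else 1)
              then [ch] else [])
            ++ pvEnds (mN : Int) (some ch)
              (if some ch == u.getLast? then (pvConstRun u : Int) + 1 else 1) rest = _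
      rw [hrun]
      congr 1
      by_cases h : mN ≤ pvConstRun (u ++ [ch])
      · rw [if_pos h, if_pos (by exact_mod_cast h)]
      · rw [if_neg h, if_neg (by exact_mod_cast h)]
    rw [hstep, List.count_append]
    have ihs := ih (u ++ [ch])
    rw [List.getLast?_concat] at ihs
    have hconc : (u ++ [ch]) ++ rest = u ++ ch :: rest := by simp
    rw [hconc] at ihs
    rw [ihs]
    -- right-hand side: peel off j = 0
    simp only [List.length_cons]
    rw [show rest.length + 1 = 1 + rest.length from by omega, List.range_add,
      List.countP_append, List.countP_map]
    have hhead : (if mN ≤ pvConstRun (u ++ [ch]) then [ch] else []).count c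
        = (List.range 1).countP (fun j =>
            decide (mN ≤ u.length + j + 1 ∧
              ((u ++ ch :: rest).drop (u.length + j + 1 - mN)).take mN
                = List.replicate mN c)) := by
      have h0 := pv_head_window_iff u ch c rest mN h1
      simp only [List.range_one, List.countP_cons, List.countP_nil, Nat.zero_add]
      by_cases hA : mN ≤ pvConstRun (u ++ [ch])
      · by_cases hB : ch = c
        · subst hB
          have hw := h0.1 ⟨hA, rfl⟩
          simp [hA, hw.1, hw.2]
        · have hnot : ¬ (mN ≤ u.length + 1 ∧
              ((u ++ ch :: rest).drop (u.length + 1 - mN)).take mN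
                = List.replicate mN c) := by
            intro hcontra
            exact hB (h0.2 (by simpa using hcontra)).2
          simp [hA, hB, hnot]
      · have hnot : ¬ (mN ≤ u.length + 1 ∧
            ((u ++ ch :: rest).drop (u.length + 1 - mN)).take mN
              = List.replicate mN c) := by
          intro hcontra
          exact hA (h0.2 (by simpa using hcontra)).1
        simp [hA, hnot]
    rw [hhead]
    have htail : (List.range rest.length).countP (fun j =>
          decide (mN ≤ (u ++ [ch]).length + j + 1 ∧
            ((u ++ ch :: rest).drop ((u ++ [ch]).length + j + 1 - mN)).take mN
              = List.replicate mN c))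
        = (List.range rest.length).countP ((fun j =>
            decide (mN ≤ u.length + j + 1 ∧
              ((u ++ ch :: rest).drop (u.length + j + 1 - mN)).take mN
                = List.replicate mN c)) ∘ (fun x => 1 + x)) := by
      apply List.countP_congr
      intro x hx
      simp only [Function.comp, List.length_append, List.length_singleton]
      have e1 : u.length + 1 + x + 1 = u.length + (1 + x) + 1 := by omega
      rw [e1]
    rw [htail, Nat.add_comm]


theorem pv_go_iff (mN : Nat) :
    ∀ (rest : List Char) (counts : PySem.Dict Char Int) (run : Int) (prev : Option Char),
    (∀ c, counts.getD c 0 ≤ 2) →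
    (checkAltGo (mN : Int) counts run prev rest = true ↔
      ∃ c, (3 : Int) ≤ counts.getD c 0 + ((pvEnds (mN : Int) prev run rest).count c : Int)) := by
  intro rest
  induction rest with
  | nil =>
    intro counts run prev hinv
    simp only [checkAltGo, pvEnds, List.count_nil, Nat.cast_zero, Int.add_zero]
    constructor
    · intro h; exact absurd h (by simp)
    · rintro ⟨c, hc⟩; exact absurd hc (by have := hinv c; omega)
  | cons ch rest ih =>
    intro counts run prev hinv
    show (if (mN : Int) ≤ (if some ch == prev then run + 1 else 1) then
        (if (3 : Int) ≤ counts.getD ch 0 + 1 then true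
         else checkAltGo (mN : Int) (counts.insert ch (counts.getD ch 0 + 1))
            (if some ch == prev then run + 1 else 1) (some ch) rest)
      else checkAltGo (mN : Int) counts
            (if some ch == prev then run + 1 else 1) (some ch) rest) = true ↔ _
    have hends : pvEnds (mN : Int) prev run (ch :: rest)
        = (if (mN : Int) ≤ (if some ch == prev then run + 1 else 1) then [ch] else [])
          ++ pvEnds (mN : Int) (some ch) (if some ch == prev then run + 1 else 1) rest := rfl
    rw [hends]
    set run' : Int := if some ch == prev then run + 1 else 1 with hrun'
    by_cases hcond : (mN : Int) ≤ run'
    · rw [if_pos hcond, if_pos hcond]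
      by_cases h3 : (3 : Int) ≤ counts.getD ch 0 + 1
      · rw [if_pos h3]
        simp only [true_iff]
        refine ⟨ch, ?_⟩
        rw [List.singleton_append, List.count_cons_self]
        push_cast
        omega
      · rw [if_neg h3]
        have hinv' : ∀ c, (counts.insert ch (counts.getD ch 0 + 1)).getD c 0 ≤ 2 := by
          intro c
          rw [PySem.Dict.getD_insert]
          split_ifs with hc
          · omega
          · exact hinv c
        rw [ih (counts.insert ch (counts.getD ch 0 + 1)) run' (some ch) hinv']
        apply exists_congr
        intro c
        rw [PySem.Dict.getD_insert]
        by_cases hc : c = ch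
        · subst hc
          rw [if_pos rfl, List.singleton_append, List.count_cons_self]
          push_cast
          constructor <;> (intro h; omega)
        · rw [if_neg hc, List.singleton_append, List.count_cons_of_ne (by simp [Ne.symm hc])]
    · rw [if_neg hcond, if_neg hcond, List.nil_append]
      exact ih counts run' (some ch) hinv

theorem pv_single_iff (k : List Char) :
    (PySem.Set.ofList k : List Char).length = 1 ↔ (k ≠ [] ∧ ∃ c, ∀ x ∈ k, x = c) := by
  constructor
  · intro hlen
    obtain ⟨c, hc⟩ : ∃ c, (PySem.Set.ofList k : List Char) = [c] := by
      rcases hs : (PySem.Set.ofList k : List Char) with _ | ⟨a, t⟩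
      · rw [hs] at hlen; simp at hlen
      · rw [hs] at hlen; simp at hlen
        exact ⟨a, by rw [hlen]⟩
    refine ⟨?_, c, ?_⟩
    · intro hk
      have : c ∈ (PySem.Set.ofList k : List Char) := by rw [hc]; simp
      have := (PySem.Set.mem_ofList k c).1 this
      rw [hk] at this; simp at this
    · intro x hx
      have : x ∈ (PySem.Set.ofList k : List Char) := (PySem.Set.mem_ofList k x).2 hx
      rw [hc] at this; simpa using this
  · rintro ⟨hne, c, hc⟩
    have hcm : c ∈ k := by
      rcases k with _ | ⟨a, t⟩
      · exact absurd rfl hne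
      · have : a = c := hc a (by simp)
        rw [← this]; simp
    have hnd := PySem.Set.nodup_ofList k
    rcases hs : (PySem.Set.ofList k : List Char) with _ | ⟨a, t⟩
    · have : c ∈ (PySem.Set.ofList k : List Char) := (PySem.Set.mem_ofList k c).2 hcm
      rw [hs] at this; simp at this
    · have ha : a = c := by
        have : a ∈ (PySem.Set.ofList k : List Char) := by rw [hs]; simp
        exact hc a ((PySem.Set.mem_ofList k a).1 this)
      have ht : t = [] := by
        rcases t with _ | ⟨b, t'⟩
        · rfl
        · exfalso
          have hb : b ∈ (PySem.Set.ofList k : List Char) := by rw [hs]; simp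
          have hbc : b = c := hc b ((PySem.Set.mem_ofList k b).1 hb)
          rw [hs] at hnd
          have hna : a ∉ b :: t' := by
            have := List.nodup_cons.1 hnd
            exact this.1
          apply hna
          rw [ha, ← hbc]
          simp
      rw [ht]; rfl

theorem pv_shift (mN n : Nat) (h1 : 1 ≤ mN) (p : Nat → Bool) :
    (List.range n).countP (fun j => decide (mN ≤ j + 1) && p (j + 1 - mN)) =
    (List.range (n + 1 - mN)).countP p := by
  by_cases hn : mN ≤ n
  · have hsplit : n = (mN - 1) + (n + 1 - mN) := by omega
    rw [show List.range n = List.range ((mN - 1) + (n + 1 - mN)) from by rw [← hsplit]]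
    rw [List.range_add, List.countP_append, List.countP_map]
    have hz : (List.range (mN - 1)).countP
        (fun j => decide (mN ≤ j + 1) && p (j + 1 - mN)) = 0 := by
      rw [List.countP_eq_zero]
      intro j hj
      rw [List.mem_range] at hj
      have : decide (mN ≤ j + 1) = false := by simp; omega
      simp [this]
    rw [hz, Nat.zero_add]
    apply List.countP_congr
    intro x hx
    have h2 : mN ≤ (mN - 1) + x + 1 := by omega
    have h3 : (mN - 1) + x + 1 - mN = x := by omega
    simp only [Function.comp]
    rw [h3]
    simp [h2]
  · have hz1 : n + 1 - mN = 0 := by omega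
    rw [hz1]
    simp only [List.range_zero, List.countP_nil]
    rw [List.countP_eq_zero]
    intro j hj
    rw [List.mem_range] at hj
    have : decide (mN ≤ j + 1) = false := by simp; omega
    simp [this]

theorem pv_pyRange0 (z : Int) :
    PySem.List.pyRange 0 z = List.map (fun k : Nat => (k : Int)) (List.range z.toNat) := by
  by_cases h : 0 ≤ z
  · have := PySem.List.pyRange_zero_natCast z.toNat
    rwa [Int.toNat_of_nonneg h] at this
  · have h0 : z.toNat = 0 := by omega
    rw [h0]
    simp only [List.range_zero, List.map_nil]
    simp [PySem.List.pyRange]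
    omega

theorem pv_A_iff (s : String) (mN : Nat) (h1 : 1 ≤ mN) :
    check s (mN : Int) = true ↔
    ∃ c, 3 ≤ (pvSlices s.toList mN (s.toList.length + 1 - mN)).count (List.replicate mN c) := by
  simp only [check]
  set l := s.toList with hl
  set K := l.length + 1 - mN with hK
  have hKz : ((l.length : Int) - (mN : Int) + 1).toNat = K := by omega
  rw [pv_pyRange0, hKz, List.foldl_map]
  have hslice : ∀ k : Nat,
      PySem.List.slice l (some (k : Int)) (some ((k : Int) + (mN : Int))) = (l.drop k).take mN := by
    intro k
    have hcast : ((k : Int) + (mN : Int)) = ((k + mN : Nat) : Int) := by push_cast; ring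
    rw [hcast, PySem.List.slice_natCast]
    congr 1
    omega
  have hfun : (fun (d : PySem.Dict (List Char) Int) (k : Nat) =>
        d.insert (PySem.List.slice l (some (k : Int)) (some ((k : Int) + (mN : Int))))
          (d.getD (PySem.List.slice l (some (k : Int)) (some ((k : Int) + (mN : Int)))) 0 + 1))
      = (fun (d : PySem.Dict (List Char) Int) (k : Nat) =>
        d.insert ((l.drop k).take mN) (d.getD ((l.drop k).take mN) 0 + 1)) := by
    funext d k
    rw [hslice k]
  rw [hfun]
  rw [show (List.range K).foldl (fun (d : PySem.Dict (List Char) Int) (k : Nat) =>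
        d.insert ((l.drop k).take mN) (d.getD ((l.drop k).take mN) 0 + 1))
        PySem.Dict.empty
      = (pvSlices l mN K).foldl (fun d x => d.insert x (d.getD x 0 + 1)) PySem.Dict.empty from by
    rw [pvSlices, List.foldl_map]]
  rw [PySem.Dict.foldl_insert_getD_add_one_eq_counter, PySem.Dict.keys_counter]
  rw [List.any_eq_true]
  constructor
  · rintro ⟨k, hkmem, hk⟩
    rw [Bool.and_eq_true, decide_eq_true_iff, PySem.Dict.getD_counter] at hk
    obtain ⟨h3, hsing⟩ := hk
    have hsing' : (PySem.Set.ofList k : List Char).length = 1 := by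
      simpa using hsing
    obtain ⟨hne, c, hc⟩ := (pv_single_iff k).1 hsing'
    have hkmem' : k ∈ pvSlices l mN K := (PySem.Set.mem_ofList _ _).1 hkmem
    have hklen : k.length = mN := by
      obtain ⟨i, hi, rfl⟩ := List.mem_map.1 hkmem'
      rw [List.mem_range] at hi
      simp only [List.length_take, List.length_drop]
      omega
    have hrep : k = List.replicate mN c := by
      rw [List.eq_replicate_iff]
      exact ⟨hklen, hc⟩
    exact ⟨c, by rw [← hrep]; exact_mod_cast h3⟩
  · rintro ⟨c, h3⟩
    have hmem : List.replicate mN c ∈ pvSlices l mN K := List.count_pos_iff.1 (by omega)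
    refine ⟨List.replicate mN c, (PySem.Set.mem_ofList _ _).2 hmem, ?_⟩
    rw [Bool.and_eq_true, decide_eq_true_iff, PySem.Dict.getD_counter]
    refine ⟨by exact_mod_cast h3, ?_⟩
    have : (PySem.Set.ofList (List.replicate mN c) : List Char).length = 1 := by
      rw [pv_single_iff]
      exact ⟨by simp; omega, c, fun x hx => List.eq_of_mem_replicate hx⟩
    simpa using this

theorem pv_B_iff (s : String) (mN : Nat) (h1 : 1 ≤ mN) :
    check_alt s (mN : Int) = true ↔
    ∃ c, 3 ≤ (pvEnds (mN : Int) none 0 s.toList).count c := by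
  unfold check_alt
  have hinv : ∀ c : Char, (PySem.Dict.empty : PySem.Dict Char Int).getD c 0 ≤ 2 := by
    intro c; simp [PySem.Dict.getD, PySem.Dict.get?, PySem.Dict.empty]
  rw [pv_go_iff mN s.toList PySem.Dict.empty 0 none hinv]
  apply exists_congr
  intro c
  have : (PySem.Dict.empty : PySem.Dict Char Int).getD c 0 = 0 := by
    simp [PySem.Dict.getD, PySem.Dict.get?, PySem.Dict.empty]
  rw [this]
  constructor <;> (intro h; omega)

-- ===== VERDICT (by name: the statement is the Claim_ definition above) =====
theorem check_spec : Claim_equal_check := by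
  intro s m _ hpre
  unfold Spec_check
  have hm : (1 : Int) ≤ m := hpre
  obtain ⟨mN, rfl⟩ : ∃ k : Nat, m = (k : Int) := ⟨m.toNat, by omega⟩
  have h1 : 1 ≤ mN := by exact_mod_cast hm
  rw [Bool.eq_iff_iff, pv_A_iff s mN h1, pv_B_iff s mN h1]
  apply exists_congr
  intro c
  set l := s.toList with hl
  have hA : (pvSlices l mN (l.length + 1 - mN)).count (List.replicate mN c)
      = (List.range (l.length + 1 - mN)).countP
          (fun i => decide ((l.drop i).take mN = List.replicate mN c)) := by
    rw [List.count_eq_countP, pvSlices, List.countP_map]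
    apply List.countP_congr
    intro i _
    by_cases h : (l.drop i).take mN = List.replicate mN c <;> simp [Function.comp, h]
  have hB : (pvEnds (mN : Int) none 0 l).count c
      = (List.range l.length).countP (fun j =>
          decide (mN ≤ j + 1) && decide ((l.drop (j + 1 - mN)).take mN = List.replicate mN c)) := by
    have h0 := pv_ends_count mN h1 c l []
    simp only [List.getLast?_nil, List.length_nil, List.nil_append, Nat.zero_add] at h0
    have : pvConstRun [] = 0 := rfl
    rw [this] at h0
    rw [Nat.cast_zero] at h0
    rw [h0]
    apply List.countP_congr
    intro j _
    rw [Bool.decide_and]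
  rw [hA, hB,
    pv_shift mN l.length h1 (fun i => decide ((l.drop i).take mN = List.replicate mN c))]
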